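-- pv_equiv track=rewrite | github.com/jramaswami/Binary_Search_Python | unique_string_split.py | solve
-- ===== SOURCE A (Python) =====
-- def solve(s):
--     soln = 0
--     for b in range(1, len(s)-1):
--         for c in range(b+1, len(s)):
--             A = s[:c]
--             B = s[b:]
--             C = s[c:] + s[:b]
--             if A != B and B != C and A != C:
--                 soln += 1
--     return soln
-- ===== SOURCE B (Python) =====
-- def solve(s):
--     # Count pairs (b, c) with 1 <= b < c < len(s) where s[:c], s[b:], s[c:]+s[:b]
--     # are pairwise distinct.  Each equality forces a length equation, so for each b
--     # at most three specific c's can fail: c = n-b (A==B), c = 2b (B==C),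
--     # c = (n+b)/2 (A==C).  Count all pairs and subtract the bad c's.
--     n = len(s)
--     total = 0
--     for b in range(1, n - 1):
--         total += n - b - 1
--         bad = set()
--         c = n - b
--         if b < c < n and s[:c] == s[b:]:
--             bad.add(c)
--         c = 2 * b
--         if b < c < n and s[b:] == s[c:] + s[:b]:
--             bad.add(c)
--         if (n + b) % 2 == 0:
--             c = (n + b) // 2
--             if b < c < n and s[:c] == s[c:] + s[:b]:
--                 bad.add(c)
--         total -= len(bad)
--     return total
-- ===== Notes on version B (the rewrite author's own statement) =====
-- stated objective: faster
-- what changed: Replaces A's double loop over all (b,c) pairs with comparisons of full slices by a single loop over b that counts all pairs and subtracts the at-most-three candidate c values (c=n-b, c=2b, c=(n+b)/2) where a length-compatible equality can hold, collected in a set.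
import Mathlib
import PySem

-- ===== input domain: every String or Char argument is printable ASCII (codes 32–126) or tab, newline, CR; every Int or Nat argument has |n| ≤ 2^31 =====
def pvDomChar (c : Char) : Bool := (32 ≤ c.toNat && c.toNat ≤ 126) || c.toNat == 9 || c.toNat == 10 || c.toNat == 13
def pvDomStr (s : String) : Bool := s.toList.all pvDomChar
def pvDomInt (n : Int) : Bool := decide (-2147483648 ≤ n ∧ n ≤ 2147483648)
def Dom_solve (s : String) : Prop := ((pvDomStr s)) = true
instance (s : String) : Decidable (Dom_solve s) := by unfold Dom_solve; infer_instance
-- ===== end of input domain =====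

-- B replaces A's double loop over all (b,c) pairs by one loop over b that counts all
-- pairs and subtracts the at-most-three length-compatible bad c values (faster).

-- ===== PORT A =====
def solve (s : String) : Int :=
  let l := s.toList
  let n := PySem.List.len l
  (PySem.List.pyRange 1 (n - 1) 1).foldl (fun soln b =>
    (PySem.List.pyRange (b + 1) n 1).foldl (fun soln c =>
      let A := PySem.List.slice l none (some c)
      let B := PySem.List.slice l (some b) none
      let C := PySem.List.slice l (some c) none ++ PySem.List.slice l none (some b)
      if A ≠ B ∧ B ≠ C ∧ A ≠ C then soln + 1 else soln) soln) 0

-- ===== PORT B =====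
-- the bad set of one iteration of Source B's loop: the candidate c's whose equality holds
def badSet (l : List Char) (n b : Int) : PySem.Set Int :=
  let s0 : PySem.Set Int := PySem.Set.empty
  let c1 := n - b
  let s1 := if b < c1 ∧ c1 < n ∧
      PySem.List.slice l none (some c1) = PySem.List.slice l (some b) none then
    PySem.Set.add s0 c1 else s0
  let c2 := 2 * b
  let s2 := if b < c2 ∧ c2 < n ∧
      PySem.List.slice l (some b) none
        = PySem.List.slice l (some c2) none ++ PySem.List.slice l none (some b) then
    PySem.Set.add s1 c2 else s1
  if PySem.Int.mod (n + b) 2 = 0 then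
    let c3 := PySem.Int.floordiv (n + b) 2
    if b < c3 ∧ c3 < n ∧
        PySem.List.slice l none (some c3)
          = PySem.List.slice l (some c3) none ++ PySem.List.slice l none (some b) then
      PySem.Set.add s2 c3 else s2
  else s2

def solve_alt (s : String) : Int :=
  let l := s.toList
  let n := PySem.List.len l
  (PySem.List.pyRange 1 (n - 1) 1).foldl (fun total b =>
    total + (n - b - 1) - PySem.Set.len (badSet l n b)) 0

-- ===== PRECONDITION & SPEC =====
def Spec_solve (s : String) (out : Int) : Prop := out = solve_alt s
instance (s : String) (out : Int) : Decidable (Spec_solve s out) := by unfold Spec_solve; infer_instance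

-- ===== CLAIM (what is proved, stated in full; the proofs are below) =====
def Claim_equal_solve : Prop := ∀ (s : String), Dom_solve s → Spec_solve s (solve s)

-- ===== LEMMAS AND PROOFS =====

set_option maxHeartbeats 1000000 in
theorem nodup_badSet (l : List Char) (n b : Int) : (badSet l n b).Nodup := by
  have h0 : (PySem.Set.empty : PySem.Set Int).Nodup := List.nodup_nil
  simp only [badSet]
  split_ifs <;>
    first
      | exact h0
      | exact PySem.Set.nodup_add _ _ h0
      | exact PySem.Set.nodup_add _ _ (PySem.Set.nodup_add _ _ h0)
      | exact PySem.Set.nodup_add _ _ (PySem.Set.nodup_add _ _ (PySem.Set.nodup_add _ _ h0))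

set_option maxHeartbeats 1000000 in
theorem mem_badSet (l : List Char) (n b c : Int) :
    c ∈ badSet l n b ↔
      ((b < n - b ∧ n - b < n ∧
          PySem.List.slice l none (some (n - b)) = PySem.List.slice l (some b) none)
        ∧ c = n - b) ∨
      ((b < 2 * b ∧ 2 * b < n ∧
          PySem.List.slice l (some b) none
            = PySem.List.slice l (some (2 * b)) none ++ PySem.List.slice l none (some b))
        ∧ c = 2 * b) ∨
      ((n + b) % 2 = 0 ∧
        (b < (n + b) / 2 ∧ (n + b) / 2 < n ∧
          PySem.List.slice l none (some ((n + b) / 2))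
            = PySem.List.slice l (some ((n + b) / 2)) none ++ PySem.List.slice l none (some b))
        ∧ c = (n + b) / 2) := by
  simp only [badSet]
  rw [PySem.Int.floordiv_eq_ediv_of_pos (by norm_num), PySem.Int.mod_eq_emod_of_pos (by norm_num)]
  split_ifs <;>
    simp only [PySem.Set.mem_add, PySem.Set.empty, List.not_mem_nil, false_or] <;>
    tauto

theorem bad_iff (l : List Char) (b c : Int) (hb : 1 ≤ b) (hc1 : b < c)
    (hc2 : c < (l.length : Int)) :
    c ∈ badSet l (l.length : Int) b ↔
      (PySem.List.slice l none (some c) = PySem.List.slice l (some b) none ∨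
       PySem.List.slice l (some b) none
         = PySem.List.slice l (some c) none ++ PySem.List.slice l none (some b) ∨
       PySem.List.slice l none (some c)
         = PySem.List.slice l (some c) none ++ PySem.List.slice l none (some b)) := by
  have h0b : (0 : Int) ≤ b := by omega
  have h0c : (0 : Int) ≤ c := by omega
  rw [mem_badSet]
  constructor
  · rintro (⟨⟨_, _, hE⟩, rfl⟩ | ⟨⟨_, _, hE⟩, rfl⟩ | ⟨_, ⟨_, _, hE⟩, rfl⟩)
    · exact Or.inl hE
    · exact Or.inr (Or.inl hE)
    · exact Or.inr (Or.inr hE)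
  · rintro (hE | hE | hE)
    · have hlen := congrArg List.length hE
      rw [PySem.List.slice_to l h0c, PySem.List.slice_from l h0b] at hlen
      simp only [List.length_take, List.length_drop] at hlen
      have hceq : c = (l.length : Int) - b := by omega
      exact Or.inl ⟨⟨by omega, by omega, hceq ▸ hE⟩, hceq⟩
    · have hlen := congrArg List.length hE
      rw [PySem.List.slice_from l h0b, PySem.List.slice_from l h0c,
        PySem.List.slice_to l h0b] at hlen
      simp only [List.length_take, List.length_drop, List.length_append] at hlen
      have hceq : c = 2 * b := by omega
      exact Or.inr (Or.inl ⟨⟨by omega, by omega, hceq ▸ hE⟩, hceq⟩)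
    · have hlen := congrArg List.length hE
      rw [PySem.List.slice_to l h0c, PySem.List.slice_from l h0c,
        PySem.List.slice_to l h0b] at hlen
      simp only [List.length_take, List.length_drop, List.length_append] at hlen
      have hceq : c = ((l.length : Int) + b) / 2 := by omega
      exact Or.inr (Or.inr ⟨by omega, ⟨by omega, by omega, hceq ▸ hE⟩, hceq⟩)

theorem key_lemma (l : List Char) (b : Int) (hb : 1 ≤ b) (hbn : b < (l.length : Int) - 1)
    (acc : Int) :
    (PySem.List.pyRange (b + 1) (l.length : Int) 1).foldl (fun soln c =>
      if PySem.List.slice l none (some c) ≠ PySem.List.slice l (some b) none ∧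
         PySem.List.slice l (some b) none
           ≠ PySem.List.slice l (some c) none ++ PySem.List.slice l none (some b) ∧
         PySem.List.slice l none (some c)
           ≠ PySem.List.slice l (some c) none ++ PySem.List.slice l none (some b)
      then soln + 1 else soln) acc
    = acc + ((l.length : Int) - b - 1) - PySem.Set.len (badSet l (l.length : Int) b) := by
  rw [PySem.List.foldl_ite_add_one]
  have hsub : ∀ x ∈ badSet l (l.length : Int) b,
      x ∈ PySem.List.pyRange (b + 1) (l.length : Int) 1 := by
    intro x hx
    rw [PySem.List.mem_pyRange_one]
    rcases (mem_badSet l (l.length : Int) b x).mp hx with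
      ⟨⟨h1, h2, _⟩, rfl⟩ | ⟨⟨h1, h2, _⟩, rfl⟩ | ⟨hm, ⟨h1, h2, _⟩, rfl⟩ <;> omega
  have hperm : List.Perm
      ((PySem.List.pyRange (b + 1) (l.length : Int) 1).filter
        (fun c => decide (c ∈ badSet l (l.length : Int) b)))
      (badSet l (l.length : Int) b) := by
    rw [List.perm_ext_iff_of_nodup
      ((PySem.List.nodup_pyRange_one (b + 1) (l.length : Int)).filter _)
      (nodup_badSet l (l.length : Int) b)]
    intro a
    simp only [List.mem_filter, decide_eq_true_eq]
    exact ⟨fun h => h.2, fun h => ⟨hsub a h, h⟩⟩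
  have hcnt2 : (PySem.List.pyRange (b + 1) (l.length : Int) 1).countP
      (fun c => decide (c ∈ badSet l (l.length : Int) b))
      = (badSet l (l.length : Int) b).length := by
    rw [List.countP_eq_length_filter]
    exact hperm.length_eq
  have hcongr : (PySem.List.pyRange (b + 1) (l.length : Int) 1).countP
      (fun c => decide (PySem.List.slice l none (some c) ≠ PySem.List.slice l (some b) none ∧
         PySem.List.slice l (some b) none
           ≠ PySem.List.slice l (some c) none ++ PySem.List.slice l none (some b) ∧
         PySem.List.slice l none (some c)
           ≠ PySem.List.slice l (some c) none ++ PySem.List.slice l none (some b)))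
      = (PySem.List.pyRange (b + 1) (l.length : Int) 1).countP
          (fun c => !decide (c ∈ badSet l (l.length : Int) b)) := by
    apply List.countP_congr
    intro a ha
    rw [PySem.List.mem_pyRange_one] at ha
    simp only [decide_eq_true_eq, Bool.not_eq_true', decide_eq_false_iff_not]
    rw [bad_iff l b a hb (by omega) (by omega)]
    tauto
  have hsplit := List.length_eq_countP_add_countP
    (fun c => decide (c ∈ badSet l (l.length : Int) b))
    (l := PySem.List.pyRange (b + 1) (l.length : Int) 1)
  simp only [decide_not, Bool.decide_eq_true] at hsplit
  have hlenR : (PySem.List.pyRange (b + 1) (l.length : Int) 1).length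
      = ((l.length : Int) - (b + 1)).toNat :=
    PySem.List.length_pyRange_one (b + 1) (l.length : Int)
  simp only [PySem.Set.len]
  rw [hcongr]
  omega

-- ===== VERDICT (by name: the statement is the Claim_ definition above) =====
theorem solve_spec : Claim_equal_solve := by
  intro s _
  unfold Spec_solve solve solve_alt
  simp only [PySem.List.len_eq]
  apply PySem.List.foldl_congr_mem
  intro acc b hbmem
  rw [PySem.List.mem_pyRange_one] at hbmem
  exact key_lemma s.toList b hbmem.1 hbmem.2 acc
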